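-- pv_equiv track=rewrite | github.com/Trottero/aoc-2023 | 14/part2.py | shift_east
-- ===== SOURCE A (Python) =====
-- def shift_east(platform: list[list[str]]) -> list[list[str]]:
--     shifted = True
--     while shifted:
--         shifted = False
--         for row in range(len(platform)):
--             if shifted:
--                 break
--             for col in range(len(platform[row]) - 1, 0, -1):
--                 if platform[row][col] == "." and platform[row][col - 1] == "O":
--                     platform[row][col] = "O"
--                     platform[row][col - 1] = "."
--                     shifted = True
--
--     return platform
-- ===== SOURCE B (Python) =====
-- def shift_east(platform: list[list[str]]) -> list[list[str]]:
--     # One linear pass per row: within each segment bounded by non-'.'/'O' cells,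
--     # count dots and rocks and repaint the segment dots-first, rocks-last (east-aligned).
--     # Mutates each row in place (as A does) and returns the same outer list.
--     for row in platform:
--         out = []
--         dots = rocks = 0
--         for cell in row:
--             if cell == ".":
--                 dots += 1
--             elif cell == "O":
--                 rocks += 1
--             else:
--                 out.extend(["."] * dots + ["O"] * rocks)
--                 dots = rocks = 0
--                 out.append(cell)
--         out.extend(["."] * dots + ["O"] * rocks)
--         row[:] = out
--     return platform
-- ===== Notes on version B (the rewrite author's own statement) =====
-- stated objective: alternative
-- what changed: A bubbles each rock one cell east per sweep and restarts the whole scan after every shifted row until a fixed point; B makes a single counting pass per row, tallying '.' and 'O' cells in each blocker-bounded segment and repainting the segment dots-first, rocks-last.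
import Mathlib
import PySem

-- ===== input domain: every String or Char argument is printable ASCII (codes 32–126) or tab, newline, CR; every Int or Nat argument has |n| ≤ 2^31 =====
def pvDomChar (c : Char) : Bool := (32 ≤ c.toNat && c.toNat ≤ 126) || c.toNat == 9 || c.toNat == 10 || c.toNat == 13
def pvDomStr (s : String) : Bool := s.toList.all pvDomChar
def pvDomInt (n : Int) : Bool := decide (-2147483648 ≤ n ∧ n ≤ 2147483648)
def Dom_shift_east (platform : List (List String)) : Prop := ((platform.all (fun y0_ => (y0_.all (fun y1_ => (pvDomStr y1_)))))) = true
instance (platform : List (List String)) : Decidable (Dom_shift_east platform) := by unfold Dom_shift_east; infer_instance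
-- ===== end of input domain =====

-- B replaces A's repeat-until-stable bubble passes by one linear counting pass per row
-- (count '.'/'O' in each blocker-bounded segment, repaint east-aligned). Both Pythons
-- mutate `platform` in place; the equivalence proved here is about the return value.

-- ===== PORT A =====
-- Weight used only for A's while-loop termination: for every 'O', the number of cells
-- strictly east of it (each swap moves an 'O' one cell east, decreasing this by one).
def muRow : List String → Nat
  | [] => 0
  | x :: t => (if x = "O" then t.length else 0) + muRow t

def muTot (p : List (List String)) : Nat := (p.map muRow).sum

-- inner `for col in range(len(row)-1, 0, -1)` loop; `col` counts down, indices always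
-- in range (col ∈ [1, len-1]) so []?/set are exact for Python's row[col] read/write
def innerLoop (r : List String) (sh : Bool) : Nat → List String × Bool
  | 0 => (r, sh)
  | c + 1 =>
    if r[c + 1]? = some "." ∧ r[c]? = some "O" then
      innerLoop ((r.set (c + 1) "O").set c ".") true c
    else
      innerLoop r sh c

-- body of `for row in range(len(platform)): if shifted: break; <inner loop>`; once
-- shifted is true the remaining indices are skipped, which is Python's break.
-- `i` comes from range(len(platform)) and set preserves length, so i is always in
-- range and the `.getD []` default is never the value Python reads.
def rowsStep (st : List (List String) × Bool) (i : Nat) : List (List String) × Bool :=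
  if st.2 then st
  else
    (st.1.set i (innerLoop (st.1[i]?.getD []) st.2 ((st.1[i]?.getD []).length - 1)).1,
     (innerLoop (st.1[i]?.getD []) st.2 ((st.1[i]?.getD []).length - 1)).2)

-- one pass of the outer for-loop over the row indices
def rowsLoop (p : List (List String)) (sh : Bool) : List (List String) × Bool :=
  (List.range p.length).foldl rowsStep (p, sh)

-- the next four lemmas exist only so that the port's while-loop terminates
theorem swap_mu : ∀ (c : Nat) (r : List String),
    r[c + 1]? = some "." → r[c]? = some "O" →
    muRow ((r.set (c + 1) "O").set c ".") + 1 = muRow r := by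
  intro c
  induction c with
  | zero =>
    intro r h1 h0
    match r with
    | [] => simp at h0
    | [a] => simp at h1
    | a :: b :: t =>
      simp at h0 h1
      subst h0 h1
      simp [List.set, muRow]
      omega
  | succ c ihc =>
    intro r h1 h0
    match r with
    | [] => simp at h0
    | a :: t =>
      simp at h0 h1
      have := ihc t h1 h0
      simp [List.set, muRow]
      omega

theorem innerLoop_mu : ∀ (c : Nat) (r : List String) (sh : Bool),
    muRow (innerLoop r sh c).1 ≤ muRow r ∧
    (sh = false → (innerLoop r sh c).2 = true → muRow (innerLoop r sh c).1 < muRow r) := by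
  intro c
  induction c with
  | zero => intro r sh; simp [innerLoop]
  | succ c ih =>
    intro r sh
    by_cases h : r[c + 1]? = some "." ∧ r[c]? = some "O"
    · have hswap := swap_mu c r h.1 h.2
      obtain ⟨hr1, -⟩ := ih ((r.set (c + 1) "O").set c ".") true
      simp only [innerLoop, if_pos h]
      exact ⟨by omega, fun _ _ => by omega⟩
    · simp only [innerLoop, if_neg h]
      exact ih r sh

theorem muTot_set : ∀ (q : List (List String)) (i : Nat) (r : List String) (hi : i < q.length),
    muTot (q.set i r) + muRow (q[i]'hi) = muTot q + muRow r := by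
  intro q
  induction q with
  | nil => intro i r hi; simp at hi
  | cons a t iht =>
    intro i r hi
    cases i with
    | zero => simp [muTot]; omega
    | succ i =>
      simp at hi
      have := iht i r hi
      simp [muTot, List.set] at this ⊢
      omega

theorem foldl_rows_mu : ∀ (is : List Nat) (q : List (List String)) (b : Bool),
    muTot (List.foldl rowsStep (q, b) is).1 ≤ muTot q ∧
    (b = false → (List.foldl rowsStep (q, b) is).2 = true →
      muTot (List.foldl rowsStep (q, b) is).1 < muTot q) := by
  intro is
  induction is with
  | nil => intro q b; simp
  | cons i is ih =>
    intro q b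
    cases b with
    | true =>
      have hstep : rowsStep (q, true) i = (q, true) := by simp [rowsStep]
      rw [List.foldl_cons, hstep]
      exact ⟨(ih q true).1, by simp⟩
    | false =>
      by_cases hi : i < q.length
      · have hstep : rowsStep (q, false) i
            = (q.set i (innerLoop (q[i]'hi) false ((q[i]'hi).length - 1)).1,
               (innerLoop (q[i]'hi) false ((q[i]'hi).length - 1)).2) := by
          simp [rowsStep, List.getElem?_eq_getElem hi]
        rw [List.foldl_cons, hstep]
        obtain ⟨hin1, hin2⟩ := innerLoop_mu ((q[i]'hi).length - 1) (q[i]'hi) false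
        have hset := muTot_set q i (innerLoop (q[i]'hi) false ((q[i]'hi).length - 1)).1 hi
        obtain ⟨ih1, ih2⟩ := ih (q.set i (innerLoop (q[i]'hi) false ((q[i]'hi).length - 1)).1)
          (innerLoop (q[i]'hi) false ((q[i]'hi).length - 1)).2
        constructor
        · omega
        · intro _ ht
          by_cases hR : (innerLoop (q[i]'hi) false ((q[i]'hi).length - 1)).2 = true
          · have := hin2 rfl hR
            omega
          · simp at hR
            have := ih2 (by rw [hR]) ht
            omega
      · have hstep : rowsStep (q, false) i = (q, false) := by
          simp [rowsStep, List.getElem?_eq_none (by omega : q.length ≤ i), innerLoop,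
            List.set_eq_of_length_le (by omega : q.length ≤ i)]
        rw [List.foldl_cons, hstep]
        exact ih q false

-- the `while shifted:` loop (shifted initialised True, reset to False at top of body)
def whileLoop (p : List (List String)) : List (List String) :=
  if hs : (rowsLoop p false).2 = true then whileLoop (rowsLoop p false).1
  else (rowsLoop p false).1
termination_by muTot p
decreasing_by exact (foldl_rows_mu (List.range p.length) p false).2 rfl hs

def shift_east (platform : List (List String)) : List (List String) :=
  whileLoop platform

-- ===== PORT B =====
-- one pass over a row: state (out, dots, rocks); a blocker flushes the counters
-- dots-first, rocks-last (east-aligned), as Source B's out.extend/append do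
def rowNormStep (st : List String × Nat × Nat) (cell : String) : List String × Nat × Nat :=
  if cell = "." then (st.1, st.2.1 + 1, st.2.2)
  else if cell = "O" then (st.1, st.2.1, st.2.2 + 1)
  else (st.1 ++ List.replicate st.2.1 "." ++ List.replicate st.2.2 "O" ++ [cell], 0, 0)

def rowNorm (row : List String) : List String :=
  let st := row.foldl rowNormStep ([], 0, 0)
  st.1 ++ List.replicate st.2.1 "." ++ List.replicate st.2.2 "O"

def shift_east_alt (platform : List (List String)) : List (List String) :=
  platform.map rowNorm

-- ===== PRECONDITION & SPEC =====
def Spec_shift_east (platform : List (List String)) (out : List (List String)) : Prop := out = shift_east_alt platform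
instance (platform : List (List String)) (out : List (List String)) : Decidable (Spec_shift_east platform out) := by unfold Spec_shift_east; infer_instance

-- ===== CLAIM (what is proved, stated in full; the proofs are below) =====
def Claim_equal_shift_east : Prop := ∀ (platform : List (List String)), Dom_shift_east platform → Spec_shift_east platform (shift_east platform)

-- ===== LEMMAS AND PROOFS =====

-- once shifted is true the inner loop keeps it true
theorem innerLoop_sh_true : ∀ (c : Nat) (r : List String), (innerLoop r true c).2 = true := by
  intro c
  induction c with
  | zero => intro r; simp [innerLoop]
  | succ c ih =>
    intro r
    by_cases h : r[c + 1]? = some "." ∧ r[c]? = some "O" <;>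
      simp [innerLoop, h, ih]

-- swapping an east-moving rock does not change the counting fold's state
theorem swap_fold : ∀ (c : Nat) (r : List String) (st : List String × Nat × Nat),
    r[c + 1]? = some "." → r[c]? = some "O" →
    List.foldl rowNormStep st ((r.set (c + 1) "O").set c ".") = List.foldl rowNormStep st r := by
  intro c
  induction c with
  | zero =>
    intro r st h1 h0
    match r with
    | [] => simp at h0
    | [a] => simp at h1
    | a :: b :: t =>
      simp at h0 h1; subst h0 h1
      simp [List.set, List.foldl, rowNormStep]
  | succ c ih =>
    intro r st h1 h0
    match r with
    | [] => simp at h0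
    | a :: t =>
      simp at h0 h1
      simp only [List.set, List.foldl]
      exact ih t _ h1 h0

-- the inner pass preserves the counting fold and the length; if it reports no shift
-- (starting from sh) the row is unchanged
theorem innerLoop_inv : ∀ (c : Nat) (r : List String) (sh : Bool),
    (∀ st, List.foldl rowNormStep st (innerLoop r sh c).1 = List.foldl rowNormStep st r) ∧
    (innerLoop r sh c).1.length = r.length ∧
    ((innerLoop r sh c).2 = false → (innerLoop r sh c).1 = r) := by
  intro c
  induction c with
  | zero => intro r sh; simp [innerLoop]
  | succ c ih =>
    intro r sh
    by_cases h : r[c + 1]? = some "." ∧ r[c]? = some "O"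
    · have hrec := ih ((r.set (c + 1) "O").set c ".") true
      simp only [innerLoop, if_pos h]
      refine ⟨?_, ?_, ?_⟩
      · intro st
        rw [hrec.1 st, swap_fold c r st h.1 h.2]
      · rw [hrec.2.1]; simp
      · intro hf
        rw [innerLoop_sh_true] at hf
        simp at hf
    · simp only [innerLoop, if_neg h]
      exact ih r sh

-- if the pass made no swap, no '.' sits immediately east of an 'O' up to index `c`
theorem innerLoop_noadj : ∀ (c : Nat) (r : List String),
    (innerLoop r false c).2 = false →
    ∀ i, i + 1 ≤ c → ¬(r[i + 1]? = some "." ∧ r[i]? = some "O") := by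
  intro c
  induction c with
  | zero => intro r _ i hi; omega
  | succ c ih =>
    intro r hf i hi
    by_cases h : r[c + 1]? = some "." ∧ r[c]? = some "O"
    · simp only [innerLoop, if_pos h] at hf
      rw [innerLoop_sh_true] at hf
      simp at hf
    · simp only [innerLoop, if_neg h] at hf
      rcases Nat.lt_or_ge (i + 1) (c + 1) with hlt | hge
      · exact ih r hf i (by omega)
      · have : i = c := by omega
        subst this
        exact h

-- a row with no 'O' immediately followed by '.' is its own normal form
theorem noadj_fixed : ∀ (l : List String) (acc : List String) (d o : Nat),
    (∀ i, i + 1 < l.length → ¬(l[i + 1]? = some "." ∧ l[i]? = some "O")) →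
    (0 < o → l[0]? ≠ some ".") →
    (List.foldl rowNormStep (acc, d, o) l).1
      ++ List.replicate (List.foldl rowNormStep (acc, d, o) l).2.1 "."
      ++ List.replicate (List.foldl rowNormStep (acc, d, o) l).2.2 "O"
    = acc ++ List.replicate d "." ++ List.replicate o "O" ++ l := by
  intro l
  induction l with
  | nil => intro acc d o _ _; simp
  | cons x t ih =>
    intro acc d o hadj hhd
    have hadj' : ∀ i, i + 1 < t.length → ¬(t[i + 1]? = some "." ∧ t[i]? = some "O") := by
      intro i hi
      have := hadj (i + 1) (by simp; omega)
      simpa using this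
    by_cases hx : x = "."
    · subst hx
      have ho : o = 0 := by
        by_contra hne
        exact hhd (by omega) (by simp)
      subst ho
      have hstep : rowNormStep (acc, d, 0) "." = (acc, d + 1, 0) := by
        simp [rowNormStep]
      rw [List.foldl_cons, hstep, ih acc (d + 1) 0 hadj' (by simp)]
      simp [List.replicate_succ']
    · by_cases hx2 : x = "O"
      · subst hx2
        have hstep : rowNormStep (acc, d, o) "O" = (acc, d, o + 1) := by
          simp [rowNormStep]
        have hhd' : 0 < o + 1 → t[0]? ≠ some "." := by
          intro _ hc
          cases t with
          | nil => simp at hc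
          | cons y s =>
            exact hadj 0 (by simp) ⟨by simpa using hc, by simp⟩
        rw [List.foldl_cons, hstep, ih acc d (o + 1) hadj' hhd']
        simp [List.replicate_succ']
      · have hstep : rowNormStep (acc, d, o) x
            = (acc ++ List.replicate d "." ++ List.replicate o "O" ++ [x], 0, 0) := by
          simp [rowNormStep, hx, hx2]
        rw [List.foldl_cons, hstep, ih _ 0 0 hadj' (by simp)]
        simp

-- the inner pass does not change a row's normal form
theorem rowNorm_innerLoop (c : Nat) (r : List String) (sh : Bool) :
    rowNorm (innerLoop r sh c).1 = rowNorm r := by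
  unfold rowNorm
  rw [(innerLoop_inv c r sh).1 ([], 0, 0)]

theorem map_rowNorm_set : ∀ (q : List (List String)) (i : Nat) (r : List String) (hi : i < q.length),
    rowNorm r = rowNorm (q[i]'hi) → (q.set i r).map rowNorm = q.map rowNorm := by
  intro q
  induction q with
  | nil => intro i r hi; simp at hi
  | cons a t iht =>
    intro i r hi he
    cases i with
    | zero => simp at he ⊢; exact he
    | succ i =>
      simp at hi he
      simp only [List.set_cons_succ, List.map_cons]
      rw [iht i r hi he]

-- a row that makes no swap is its own normal form
theorem rowNorm_fixed (r : List String)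
    (hf : (innerLoop r false (r.length - 1)).2 = false) : rowNorm r = r := by
  have hnoadj := innerLoop_noadj (r.length - 1) r hf
  unfold rowNorm
  have := noadj_fixed r [] 0 0 (fun i hi => hnoadj i (by omega)) (by omega)
  simpa using this

-- one pass over the row indices preserves the platform's normal form; if it reports
-- no shift the platform is unchanged and every visited row is its own normal form
theorem foldl_rows_inv : ∀ (is : List Nat) (q : List (List String)) (b : Bool),
    (List.foldl rowsStep (q, b) is).1.map rowNorm = q.map rowNorm ∧
    ((List.foldl rowsStep (q, b) is).2 = false →
      b = false ∧ (List.foldl rowsStep (q, b) is).1 = q ∧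
      ∀ i ∈ is, (hi : i < q.length) → rowNorm (q[i]'hi) = q[i]'hi) := by
  intro is
  induction is with
  | nil =>
    intro q b
    exact ⟨rfl, fun hb => ⟨hb, rfl, by simp⟩⟩
  | cons i is ih =>
    intro q b
    cases b with
    | true =>
      have hstep : rowsStep (q, true) i = (q, true) := by simp [rowsStep]
      rw [List.foldl_cons, hstep]
      refine ⟨(ih q true).1, fun hf => ?_⟩
      exact absurd ((ih q true).2 hf).1 (by simp)
    | false =>
      by_cases hi : i < q.length
      · have hstep : rowsStep (q, false) i
            = (q.set i (innerLoop (q[i]'hi) false ((q[i]'hi).length - 1)).1,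
               (innerLoop (q[i]'hi) false ((q[i]'hi).length - 1)).2) := by
          simp [rowsStep, List.getElem?_eq_getElem hi]
        rw [List.foldl_cons, hstep]
        have hnorm : rowNorm (innerLoop (q[i]'hi) false ((q[i]'hi).length - 1)).1
            = rowNorm (q[i]'hi) := rowNorm_innerLoop _ _ _
        obtain ⟨ih1, ih2⟩ := ih (q.set i (innerLoop (q[i]'hi) false ((q[i]'hi).length - 1)).1)
          (innerLoop (q[i]'hi) false ((q[i]'hi).length - 1)).2
        refine ⟨by rw [ih1, map_rowNorm_set q i _ hi hnorm], fun hf => ?_⟩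
        obtain ⟨hR2, hres1, hrows⟩ := ih2 hf
        have hr1 : (innerLoop (q[i]'hi) false ((q[i]'hi).length - 1)).1 = q[i]'hi :=
          (innerLoop_inv ((q[i]'hi).length - 1) (q[i]'hi) false).2.2 hR2
        have hq : q.set i (innerLoop (q[i]'hi) false ((q[i]'hi).length - 1)).1 = q := by
          rw [hr1]; exact List.set_getElem_self hi
        simp only [hq] at hrows
        refine ⟨rfl, hres1.trans hq, ?_⟩
        intro j hj hjlt
        rcases List.mem_cons.mp hj with hji | hjin
        · subst hji
          exact rowNorm_fixed _ hR2
        · exact hrows j hjin hjlt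
      · have hstep : rowsStep (q, false) i = (q, false) := by
          simp [rowsStep, List.getElem?_eq_none (by omega : q.length ≤ i), innerLoop,
            List.set_eq_of_length_le (by omega : q.length ≤ i)]
        rw [List.foldl_cons, hstep]
        obtain ⟨ih1, ih2⟩ := ih q false
        refine ⟨ih1, fun hf => ?_⟩
        obtain ⟨-, hres1, hrows⟩ := ih2 hf
        refine ⟨rfl, hres1, ?_⟩
        intro j hj hjlt
        rcases List.mem_cons.mp hj with hji | hjin
        · subst hji; omega
        · exact hrows j hjin hjlt

theorem whileLoop_norm_aux : ∀ (n : Nat) (p : List (List String)),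
    muTot p < n → whileLoop p = p.map rowNorm := by
  intro n
  induction n with
  | zero => intro p h; omega
  | succ n ih =>
    intro p h
    rw [whileLoop]
    unfold rowsLoop
    by_cases hs : (List.foldl rowsStep (p, false) (List.range p.length)).2 = true
    · simp only [dif_pos hs]
      have hdec := (foldl_rows_mu (List.range p.length) p false).2 rfl hs
      rw [ih _ (by exact Nat.lt_of_lt_of_le hdec (by omega))]
      exact (foldl_rows_inv (List.range p.length) p false).1
    · simp only [dif_neg hs]
      simp at hs
      obtain ⟨-, hid, hrows⟩ := (foldl_rows_inv (List.range p.length) p false).2 hs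
      rw [hid]
      apply List.ext_getElem (by simp)
      intro i hi1 hi2
      simp
      exact (hrows i (List.mem_range.mpr (by simpa using hi2)) (by simpa using hi2)).symm

theorem whileLoop_norm (p : List (List String)) : whileLoop p = p.map rowNorm :=
  whileLoop_norm_aux (muTot p + 1) p (by omega)

-- ===== VERDICT (by name: the statement is the Claim_ definition above) =====
theorem shift_east_spec : Claim_equal_shift_east := by
  intro platform _
  unfold Spec_shift_east shift_east shift_east_alt
  exact whileLoop_norm platform
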